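-- pv_equiv track=rewrite | github.com/aver1001/github-practice | programmers/Level 2/삼각 달팽이/solve.py | solution
-- ===== SOURCE A (Python) =====
-- def solution(n):
--     temp = [[0 for _ in range(n)]for _ in range (n)]
--     add = [[1,0],[-1,1],[0,-1]]
--     answer = []
--     x = 0
--     y = 0
--     turn = 0
--     check = [i for i in range (1,n+1)]
--     turnTime = check.pop()
--     for i in range (1, int((n+1)*n/2)+1):
--         temp[x][y] = i
--         turnTime -= 1
--         if turnTime == 0 and len(check) != 0:
--             turnTime = check.pop()
--             if turn != 2:
--                 turn +=1
--             else:
--                 turn = 0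
--         x += add[turn][0]
--         y += add[turn][1]
--
--     for i in range(n+1):
--         ax = i-1
--         ay = 0
--         for j in range (i):
--             answer.append(temp[ax][ay])
--             ax -= 1
--             ay += 1
--     return(answer)
-- ===== SOURCE B (Python) =====
-- def solution(n):
--     # Jagged triangle filled by walking the spiral directly in triangle
--     # coordinates (down / right / up-the-hypotenuse, run lengths n, n-1, ...),
--     # then flattened row by row.  No n-by-n square, no diagonal-read pass.
--     tri = [[0] * (i + 1) for i in range(n)]
--     r, c, k = -1, 0, 0
--     for i in range(n):
--         for _ in range(i, n):
--             if i % 3 == 0: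
--                 r += 1
--             elif i % 3 == 1:
--                 c += 1
--             else:
--                 r -= 1
--                 c -= 1
--             k += 1
--             tri[r][c] = k
--     return [v for row in tri for v in row]
-- ===== Notes on version B (the rewrite author's own statement) =====
-- stated objective: simpler
-- what changed: B walks the spiral directly in a jagged triangle (rows of length 1..n) with directions cycled by i%3 and run lengths n,n-1,..., then flattens the rows, instead of A's n-by-n square grid filled via a turnTime/pop bookkeeping loop followed by a separate anti-diagonal reading pass.
import Mathlib
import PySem

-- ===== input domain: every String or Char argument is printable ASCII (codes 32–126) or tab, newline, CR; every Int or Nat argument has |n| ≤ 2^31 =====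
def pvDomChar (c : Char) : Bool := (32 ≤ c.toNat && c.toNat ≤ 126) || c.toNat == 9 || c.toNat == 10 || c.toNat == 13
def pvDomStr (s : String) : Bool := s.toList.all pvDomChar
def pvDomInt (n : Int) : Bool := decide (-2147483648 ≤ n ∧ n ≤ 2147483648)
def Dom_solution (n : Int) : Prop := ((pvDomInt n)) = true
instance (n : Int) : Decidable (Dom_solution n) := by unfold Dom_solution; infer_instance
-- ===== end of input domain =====

-- B replaces A's n×n square grid + turnTime/pop bookkeeping + separate anti-diagonal
-- reading pass by a single spiral walk in a jagged triangle, flattened row by row (simpler).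

-- ===== PORT A =====
-- g[x][y] = v  (Python raises IndexError when x or y is out of range; inside Pre_
-- every write of either program is in range, so the total pySetD/pyGetD forms are exact)
def pvSet2 (g : List (List Int)) (x y v : Int) : List (List Int) :=
  PySem.List.pySetD g x (PySem.List.pySetD (PySem.List.pyGetD g x []) y v)

-- g[x][y]  (reads of both programs are in range inside Pre_, so pyGetD is exact)
def pvGet2 (g : List (List Int)) (x y : Int) : Int :=
  PySem.List.pyGetD (PySem.List.pyGetD g x []) y 0

def pvAddA : List (List Int) := [[1, 0], [-1, 1], [0, -1]]

-- int(v/2) for the even nonnegative integer v = (n+1)*n: Python computes v exactly,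
-- '/' rounds the integer v/2 to the nearest 53-bit double (ties to even), and int()
-- of that (integral) double is the rounded integer itself; this models that rounding
-- exactly for v/2 ≥ 0 (which (n+1)*n/2 always is).
def pyFloatInt (w : Int) : Int :=
  if w ≤ 9007199254740992 then w
  else
    let e := w.toNat.log2 - 52
    let p : Int := (2 : Int) ^ e
    let q := w / p
    let r := w % p
    if 2 * r > p ∨ (2 * r = p ∧ q % 2 = 1) then (q + 1) * p else q * p

-- 'for i in range(1, int((n+1)*n/2)+1)': fuel = trip count, i = loop variable,
-- state = (temp, x, y, turn, turnTime, check)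
def loopA : Nat → Int → (List (List Int) × Int × Int × Int × Int × List Int) →
    (List (List Int) × Int × Int × Int × Int × List Int)
  | 0, _, st => st
  | f + 1, i, (temp, x, y, turn, turnTime, check) =>
    let temp := pvSet2 temp x y i
    let turnTime := turnTime - 1
    let (turnTime, check, turn) :=
      if turnTime = 0 ∧ check ≠ [] then
        -- guarded by check ≠ [], so list.pop never raises here; getD is unreachable
        let p := (PySem.List.pop? check (-1)).getD (0, [])
        (p.1, p.2, if turn ≠ 2 then turn + 1 else 0)
      else (turnTime, check, turn)
    loopA f (i + 1)
      (temp, x + pvGet2 pvAddA turn 0, y + pvGet2 pvAddA turn 1, turn, turnTime, check)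

-- inner 'for j in range(i)' of the reading pass: appends temp[ax][ay], ax -= 1, ay += 1
def readRowA : Nat → List (List Int) → Int → Int → List Int → List Int
  | 0, _, _, _, acc => acc
  | j + 1, temp, ax, ay, acc => readRowA j temp (ax - 1) (ay + 1) (acc ++ [pvGet2 temp ax ay])

-- outer 'for i in range(n+1)' of the reading pass
def readAllA : Nat → Int → List (List Int) → List Int → List Int
  | 0, _, _, acc => acc
  | f + 1, i, temp, acc => readAllA f (i + 1) temp (readRowA i.toNat temp (i - 1) 0 acc)

def solution (n : Int) : List Int :=
  let temp := List.replicate n.toNat (List.replicate n.toNat (0 : Int))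
  -- check = [i for i in range(1, n+1)]; turnTime = check.pop()
  match PySem.List.pop? (PySem.List.pyRange 1 (n + 1) 1) (-1) with
  | none => []   -- IndexError for n ≤ 0 (pop from empty list); excluded by Pre_
  | some (turnTime, check) =>
    -- int((n+1)*n/2): the product is exact, the float division is modelled by pyFloatInt
    let st := loopA (pyFloatInt (PySem.Int.truncdiv ((n + 1) * n) 2)).toNat 1
      (temp, 0, 0, 0, turnTime, check)
    readAllA (n + 1).toNat 0 st.1 []

-- ===== PORT B =====
-- inner 'for _ in range(i, n)': move (direction by i % 3), k += 1, tri[r][c] = k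
def innerB : Nat → Int → (List (List Int) × Int × Int × Int) →
    (List (List Int) × Int × Int × Int)
  | 0, _, st => st
  | j + 1, i, (tri, r, c, k) =>
    let (r, c) :=
      if PySem.Int.mod i 3 = 0 then (r + 1, c)
      else if PySem.Int.mod i 3 = 1 then (r, c + 1)
      else (r - 1, c - 1)
    let k := k + 1
    innerB j i (pvSet2 tri r c k, r, c, k)

-- outer 'for i in range(n)'
def loopB : Nat → Int → Int → (List (List Int) × Int × Int × Int) →
    (List (List Int) × Int × Int × Int)
  | 0, _, _, st => st
  | f + 1, i, n, st => loopB f (i + 1) n (innerB (n - i).toNat i st)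

def solution_alt (n : Int) : List Int :=
  let tri := (List.range n.toNat).map (fun i => List.replicate (i + 1) (0 : Int))
  let st := loopB n.toNat 0 n (tri, -1, 0, 0)
  st.1.flatMap (fun row => row)

-- ===== PRECONDITION & SPEC =====
-- Pre_ excludes n ≤ 0, where A raises IndexError (pop from the empty list [1..n]),
-- and n with (n+1)*n > 2^54 (trip count n(n+1)/2 > 2^53), where A's loop bound
-- int((n+1)*n/2) is computed by float division and can silently deviate from
-- n(n+1)/2, so A's spiral is cut short or overruns — a float-rounding artefact
-- (those runs also need an n×n grid of > 10^16 cells, far beyond any machine).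
def Pre_solution (n : Int) : Prop := 1 ≤ n ∧ (n + 1) * n ≤ 18014398509481984
instance (n : Int) : Decidable (Pre_solution n) := by unfold Pre_solution; infer_instance
def pvWitness_solution : Int := (4)

def Spec_solution (n : Int) (out : List Int) : Prop := out = solution_alt n
instance (n : Int) (out : List Int) : Decidable (Spec_solution n out) := by unfold Spec_solution; infer_instance

-- ===== CLAIM (what is proved, stated in full; the proofs are below) =====
def Claim_equal_solution : Prop := ∀ (n : Int), Dom_solution n → Pre_solution n → Spec_solution n (solution n)


-- ===== LEMMAS AND PROOFS =====

-- abbreviations for the proofs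
def pvState := List (List Int) × Int × Int × Int × Int × List Int

-- the triangle view of the square grid: row r = anti-diagonal x + y = r of S
def rowOf (S : List (List Int)) (r : Nat) : List Int :=
  (List.range (r + 1)).map (fun (c : Nat) => pvGet2 S ((r : Int) - (c : Int)) (c : Int))

def triOf (n : Nat) (S : List (List Int)) : List (List Int) :=
  (List.range n).map (rowOf S)

def SqShape (n : Nat) (S : List (List Int)) : Prop :=
  S.length = n ∧ ∀ (j : Nat) (h : j < S.length), S[j].length = n

-- triangle-coordinate direction of turn s
def dT (s : Int) : Int × Int := if s = 0 then (1, 0) else if s = 1 then (0, 1) else (-1, -1)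

def nextTurn (turn : Int) : Int := if turn ≠ 2 then turn + 1 else 0

def checkOf (m : Nat) : List Int := (List.range m).map (fun t : Nat => (1 : Int) + t)

def tn : Nat → Nat
  | 0 => 0
  | m + 1 => (m + 1) + tn m

lemma two_tn (m : Nat) : 2 * tn m = m * (m + 1) := by
  induction m with
  | zero => simp [tn]
  | succ k ih => simp [tn]; ring_nf; ring_nf at ih; omega

lemma loopA_add (a b : Nat) (i : Int) (st : pvState) :
    loopA (a + b) i st = loopA b (i + a) (loopA a i st) := by
  induction a generalizing i st with
  | zero => simp [loopA]
  | succ k ih =>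
    obtain ⟨S, x, y, turn, tt, chk⟩ := st
    have h1 : k + 1 + b = (k + b) + 1 := by omega
    rw [h1]
    show loopA (k + b) (i + 1) _ = _
    rw [ih]
    have : i + 1 + (k : Int) = i + (k + 1 : Nat) := by push_cast; ring
    rw [this]
    rfl

lemma sqshape_set (n : Nat) (S : List (List Int)) (hS : SqShape n S) (x y : Int) (v : Int)
    (hx : 0 ≤ x) (hy : 0 ≤ y) : SqShape n (pvSet2 S x y v) := by
  obtain ⟨hl, hrow⟩ := hS
  unfold pvSet2
  rw [PySem.List.pySetD_of_nonneg _ _ hx]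
  constructor
  · simpa using hl
  · intro j hj
    rw [List.getElem_set]
    split_ifs with h
    · rw [PySem.List.pyGetD_of_nonneg _ _ hx, PySem.List.pySetD_of_nonneg _ _ hy]
      subst h
      by_cases hin : x.toNat < S.length
      · simp [List.getD_eq_getElem?_getD, List.getElem?_eq_getElem hin]
        exact hrow _ hin
      · simp at hj; omega
    · exact hrow _ (by simpa using hj)

lemma getD_eq_getElem? {α : Type} (xs : List α) (i : Nat) (d : α) :
    xs.getD i d = (xs[i]?).getD d := by simp [List.getD_eq_getElem?_getD]

lemma pvGet2_nat (S : List (List Int)) (a b : Nat) :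
    pvGet2 S (a : Int) (b : Int) = ((S[a]?).getD [])[b]?.getD 0 := by
  unfold pvGet2
  rw [PySem.List.pyGetD_natCast, PySem.List.pyGetD_natCast, getD_eq_getElem?, getD_eq_getElem?]

lemma pvSet2_nat (S : List (List Int)) (a b : Nat) (v : Int) :
    pvSet2 S (a : Int) (b : Int) v = S.set a (((S[a]?).getD []).set b v) := by
  unfold pvSet2
  rw [PySem.List.pySetD_natCast, PySem.List.pyGetD_natCast, PySem.List.pySetD_natCast,
    getD_eq_getElem?]

lemma triOf_length (n : Nat) (S : List (List Int)) : (triOf n S).length = n := by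
  simp [triOf]

lemma rowOf_length (S : List (List Int)) (r : Nat) : (rowOf S r).length = r + 1 := by
  simp [rowOf]

lemma triOf_getElem? (n : Nat) (S : List (List Int)) (r : Nat) :
    (triOf n S)[r]? = if r < n then some (rowOf S r) else none := by
  unfold triOf
  rw [List.getElem?_map]
  by_cases h : r < n
  · rw [List.getElem?_eq_getElem (by simpa using h), List.getElem_range]
    simp [h]
  · rw [List.getElem?_eq_none (by simpa using h)]
    simp [h]

lemma rowOf_getElem? (S : List (List Int)) (r c : Nat) :
    (rowOf S r)[c]? = if c < r + 1 then some (pvGet2 S ((r : Int) - (c : Int)) (c : Int))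
      else none := by
  unfold rowOf
  rw [List.getElem?_map]
  by_cases h : c < r + 1
  · rw [List.getElem?_eq_getElem (by simpa using h), List.getElem_range]
    simp [h]
  · rw [List.getElem?_eq_none (by simpa using h)]
    simp [h]

lemma pvGet2_nat_set (S : List (List Int))
    (hlen : ∀ (j : Nat) (h : j < S.length), S[j].length = S.length)
    (a b x y : Nat) (hx : x < S.length) (hy : y < S.length) (v : Int) :
    pvGet2 (S.set x (((S[x]?).getD []).set y v)) (a : Int) (b : Int)
      = if a = x ∧ b = y then v else pvGet2 S (a : Int) (b : Int) := by
  rw [pvGet2_nat, pvGet2_nat]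
  by_cases hax : a = x
  · subst hax
    rw [List.getElem?_set_self hx]
    simp only [Option.getD_some]
    by_cases hby : b = y
    · subst hby
      rw [List.getElem?_set_self]
      · simp
      · rw [List.getElem?_eq_getElem hx]
        simp only [Option.getD_some]
        rw [hlen a hx]
        exact hy
    · rw [List.getElem?_set_ne (fun h => hby h.symm)]
      simp [hby]
  · rw [List.getElem?_set_ne (fun h => hax h.symm)]
    simp [hax]

lemma triOf_set (n : Nat) (S : List (List Int)) (hS : SqShape n S) (r c : Nat)
    (hc : c ≤ r) (hr : r < n) (v : Int) :
    triOf n (pvSet2 S ((r : Int) - (c : Int)) (c : Int) v)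
      = pvSet2 (triOf n S) (r : Int) (c : Int) v := by
  obtain ⟨hl, hrow⟩ := hS
  have hrc : ((r : Int) - (c : Int)) = ((r - c : Nat) : Int) := by push_cast; omega
  rw [hrc, pvSet2_nat, pvSet2_nat, triOf_getElem?]
  rw [if_pos hr]
  simp only [Option.getD_some]
  have hlen' : ∀ (j : Nat) (h : j < S.length), S[j].length = S.length := by
    intro j h; rw [hrow j h, hl]
  apply List.ext_getElem?
  intro r'
  rw [triOf_getElem?]
  by_cases hrr : r = r'
  · subst hrr
    rw [if_pos hr, List.getElem?_set_self (by rw [triOf_length]; exact hr)]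
    congr 1
    apply List.ext_getElem?
    intro c'
    rw [rowOf_getElem?]
    by_cases hcc : c = c'
    · subst hcc
      rw [if_pos (by omega), List.getElem?_set_self (by rw [rowOf_length]; omega)]
      have hcast : ((r : Int) - (c : Int)) = ((r - c : Nat) : Int) := by push_cast; omega
      rw [hcast, pvGet2_nat_set S hlen' (r - c) c (r - c) c (by omega) (by omega) v]
      simp
    · rw [List.getElem?_set_ne hcc, rowOf_getElem?]
      by_cases hc' : c' < r + 1
      · rw [if_pos hc', if_pos hc']
        have hcast : ((r : Int) - (c' : Int)) = ((r - c' : Nat) : Int) := by push_cast; omega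
        rw [hcast, pvGet2_nat_set S hlen' (r - c') c' (r - c) c (by omega) (by omega) v]
        rw [if_neg (by omega)]
      · rw [if_neg hc', if_neg hc']
  · rw [List.getElem?_set_ne hrr, triOf_getElem?]
    by_cases hr' : r' < n
    · rw [if_pos hr', if_pos hr']
      congr 1
      apply List.ext_getElem?
      intro c'
      rw [rowOf_getElem?, rowOf_getElem?]
      by_cases hc' : c' < r' + 1
      · rw [if_pos hc', if_pos hc']
        have hcast : ((r' : Int) - (c' : Int)) = ((r' - c' : Nat) : Int) := by push_cast; omega
        rw [hcast, pvGet2_nat_set S hlen' (r' - c') c' (r - c) c (by omega) (by omega) v]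
        rw [if_neg (by omega)]
      · rw [if_neg hc', if_neg hc']
    · rw [if_neg hr', if_neg hr']

lemma triOf_init (n : Nat) :
    triOf n (List.replicate n (List.replicate n (0 : Int)))
      = (List.range n).map (fun (i : Nat) => List.replicate (i + 1) (0 : Int)) := by
  apply List.ext_getElem?
  intro r
  rw [triOf_getElem?, List.getElem?_map]
  by_cases hr : r < n
  · rw [List.getElem?_eq_getElem (by simpa using hr), List.getElem_range]
    rw [if_pos hr]
    simp only [Option.map_some]
    congr 1
    apply List.ext_getElem?
    intro c
    rw [rowOf_getElem?]
    by_cases hc : c < r + 1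
    · rw [if_pos hc]
      have hcast : ((r : Int) - (c : Int)) = ((r - c : Nat) : Int) := by omega
      rw [hcast, pvGet2_nat]
      rw [List.getElem?_replicate, if_pos (by omega : r - c < n)]
      simp only [Option.getD_some]
      rw [List.getElem?_replicate, if_pos (by omega : c < n)]
      rw [List.getElem?_replicate, if_pos hc]
      simp
    · rw [if_neg hc, List.getElem?_replicate, if_neg (by omega)]
  · rw [List.getElem?_eq_none (by simpa using hr), if_neg hr]
    simp

lemma readRow_eq (S : List (List Int)) (j : Nat) :
    ∀ (ax ay : Int) (acc : List Int), readRowA j S ax ay acc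
      = acc ++ (List.range j).map (fun (t : Nat) => pvGet2 S (ax - t) (ay + t)) := by
  induction j with
  | zero => intro ax ay acc; simp [readRowA]
  | succ k ih =>
    intro ax ay acc
    show readRowA k S (ax - 1) (ay + 1) (acc ++ [pvGet2 S ax ay]) = _
    rw [ih]
    rw [List.range_succ_eq_map, List.map_cons, List.map_map]
    rw [List.append_assoc]
    simp only [List.singleton_append, Nat.cast_zero]
    congr 2
    · congr 1 <;> ring
    · apply List.map_congr_left
      intro t _
      simp only [Function.comp_apply]
      congr 1 <;> push_cast <;> ring

def rowBlock (S : List (List Int)) (i : Nat) : List Int :=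
  (List.range i).map (fun (t : Nat) => pvGet2 S ((i : Int) - 1 - t) (t : Int))

lemma readAll_go (S : List (List Int)) (f : Nat) :
    ∀ (i0 : Nat) (acc : List Int), readAllA f (i0 : Int) S acc
      = acc ++ ((List.range f).map (fun (d : Nat) => rowBlock S (i0 + d))).flatten := by
  induction f with
  | zero => intro i0 acc; simp [readAllA]
  | succ k ih =>
    intro i0 acc
    show readAllA k ((i0 : Int) + 1) S (readRowA (i0 : Int).toNat S ((i0 : Int) - 1) 0 acc) = _
    rw [Int.toNat_natCast, readRow_eq]
    have hcast : ((i0 : Int) + 1) = ((i0 + 1 : Nat) : Int) := by push_cast; ring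
    rw [hcast, ih]
    rw [List.range_succ_eq_map, List.map_cons, List.map_map, List.flatten_cons,
      ← List.append_assoc]
    congr 2
    · unfold rowBlock
      apply List.map_congr_left
      intro t _
      congr 1
      push_cast; ring
    · apply List.map_congr_left
      intro d _
      simp only [Function.comp_apply]
      congr 1
      omega

lemma readAll_eq_triOf (n : Nat) (S : List (List Int)) :
    readAllA (n + 1) 0 S [] = (triOf n S).flatten := by
  have h0 : (0 : Int) = ((0 : Nat) : Int) := by norm_num
  rw [h0, readAll_go, List.nil_append]
  rw [List.range_succ_eq_map, List.map_cons, List.map_map, List.flatten_cons]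
  have h1 : rowBlock S (0 + 0) = [] := by simp [rowBlock]
  rw [h1, List.nil_append]
  unfold triOf
  congr 1
  apply List.map_congr_left
  intro r _
  simp only [Function.comp_apply]
  unfold rowBlock rowOf
  have hz : 0 + r.succ = r + 1 := by omega
  rw [hz]
  apply List.map_congr_left
  intro t _
  congr 1
  push_cast; ring

def postRC (r c turn : Int) (check : List Int) : Int × Int × Int × Int × List Int :=
  let turn' := if check = [] then turn else nextTurn turn
  let d := dT turn'
  ((r + d.1) - (c + d.2), c + d.2, turn',
    if check = [] then 0 else ((PySem.List.pop? check (-1)).getD (0, [])).1,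
    if check = [] then [] else ((PySem.List.pop? check (-1)).getD (0, [])).2)

lemma addA_eval (turn : Int) (h3 : turn = 0 ∨ turn = 1 ∨ turn = 2) :
    pvGet2 pvAddA turn 0 = (dT turn).1 - (dT turn).2 ∧
    pvGet2 pvAddA turn 1 = (dT turn).2 := by
  rcases h3 with h | h | h <;> subst h <;> constructor <;> decide

lemma nextTurn3 (turn : Int) (h3 : turn = 0 ∨ turn = 1 ∨ turn = 2) :
    nextTurn turn = 0 ∨ nextTurn turn = 1 ∨ nextTurn turn = 2 := by
  rcases h3 with h | h | h <;> subst h <;> decide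

lemma loopA_succ (f : Nat) (i : Int) (S : List (List Int)) (x y turn tt : Int)
    (check : List Int) :
    loopA (f + 1) i (S, x, y, turn, tt, check)
      = (let trip :=
          if tt - 1 = 0 ∧ check ≠ [] then
            (((PySem.List.pop? check (-1)).getD (0, [])).1,
              ((PySem.List.pop? check (-1)).getD (0, [])).2,
              if turn ≠ 2 then turn + 1 else 0)
          else (tt - 1, check, turn)
        loopA f (i + 1) (pvSet2 S x y i, x + pvGet2 pvAddA trip.2.2 0,
          y + pvGet2 pvAddA trip.2.2 1, trip.2.2, trip.1, trip.2.1)) := by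
  show loopA f (i + 1) _ = _
  split <;> rfl

lemma innerB_succ (j : Nat) (i : Int) (tri : List (List Int)) (r c k : Int) :
    innerB (j + 1) i (tri, r, c, k)
      = (let rc := if PySem.Int.mod i 3 = 0 then (r + 1, c)
          else if PySem.Int.mod i 3 = 1 then (r, c + 1) else (r - 1, c - 1)
        innerB j i (pvSet2 tri rc.1 rc.2 (k + 1), rc.1, rc.2, k + 1)) := by
  show innerB j i _ = _
  split <;> rfl

lemma run_corr (n : Nat) (i turn : Int) (hmod : PySem.Int.mod i 3 = turn)
    (h3 : turn = 0 ∨ turn = 1 ∨ turn = 2) :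
    ∀ (u : Nat) (S : List (List Int)) (r c k : Int) (check : List Int),
    SqShape n S →
    (∀ j : Nat, j < u + 1 →
      0 ≤ c + (j + 1) * (dT turn).2 ∧
      c + (j + 1) * (dT turn).2 ≤ r + (j + 1) * (dT turn).1 ∧
      r + (j + 1) * (dT turn).1 < n) →
    ∃ S', loopA (u + 1) (k + 1)
        (S, (r + (dT turn).1) - (c + (dT turn).2), c + (dT turn).2, turn, ((u : Int) + 1), check)
        = (S', postRC (r + ((u : Int) + 1) * (dT turn).1) (c + ((u : Int) + 1) * (dT turn).2) turn check)
      ∧ SqShape n S'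
      ∧ innerB (u + 1) i (triOf n S, r, c, k)
        = (triOf n S', r + ((u : Int) + 1) * (dT turn).1, c + ((u : Int) + 1) * (dT turn).2, k + ((u : Int) + 1)) := by
  have hstepB : ∀ (r c : Int),
      (if PySem.Int.mod i 3 = 0 then (r + 1, c)
       else if PySem.Int.mod i 3 = 1 then (r, c + 1) else (r - 1, c - 1))
        = (r + (dT turn).1, c + (dT turn).2) := by
    intro r c
    rw [hmod]
    rcases h3 with h | h | h <;> subst h <;> norm_num [hmod, dT, Prod.ext_iff] <;> omega
  intro u
  induction u with
  | zero =>
    intro S r c k check hS hvalid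
    have hv0 := hvalid 0 (by omega)
    simp only [Nat.cast_zero, zero_add, one_mul] at hv0 ⊢
    obtain ⟨hA0, hA1⟩ := addA_eval turn h3
    obtain ⟨rN, hrN⟩ : ∃ m : Nat, r + (dT turn).1 = (m : Int) :=
      ⟨(r + (dT turn).1).toNat, by omega⟩
    obtain ⟨cN, hcN⟩ : ∃ m : Nat, c + (dT turn).2 = (m : Int) :=
      ⟨(c + (dT turn).2).toNat, by omega⟩
    have hsub : (r + (dT turn).1) - (c + (dT turn).2) = ((rN : Int) - (cN : Int)) := by
      rw [← hrN, ← hcN]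
    refine ⟨pvSet2 S ((r + (dT turn).1) - (c + (dT turn).2)) (c + (dT turn).2) (k + 1), ?_, ?_, ?_⟩
    · rw [loopA_succ]
      by_cases hchk : check = []
      · subst hchk
        rw [if_neg (by simp)]
        dsimp only
        simp only [loopA]
        unfold postRC
        simp only [eq_self_iff_true, if_true, hA0, hA1, Prod.mk.injEq]
        and_intros <;> first | rfl | trivial | ring | norm_num
      · rw [if_pos ⟨by norm_num, hchk⟩]
        dsimp only
        simp only [loopA]
        unfold postRC
        rw [if_neg hchk, if_neg hchk, if_neg hchk]
        obtain ⟨hA0', hA1'⟩ := addA_eval (nextTurn turn) (nextTurn3 turn h3)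
        have hfold : (if turn ≠ 2 then turn + 1 else 0) = nextTurn turn := rfl
        simp only [hfold, hA0', hA1', Prod.mk.injEq]
        and_intros <;> first | rfl | trivial | ring | norm_num
    · exact sqshape_set n S hS _ _ _ (by omega) (by omega)
    · rw [innerB_succ, hstepB]
      simp only [innerB]
      rw [hrN, hcN, ← triOf_set n S hS rN cN (by omega) (by omega), ← hrN, ← hcN]
      all_goals simp only [Prod.mk.injEq]
      all_goals and_intros <;> first | rfl | trivial | ring | norm_num
  | succ u ih =>
    intro S r c k check hS hvalid
    have hv0 := hvalid 0 (by omega)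
    simp only [zero_add, one_mul] at hv0
    obtain ⟨hA0, hA1⟩ := addA_eval turn h3
    obtain ⟨rN, hrN⟩ : ∃ m : Nat, r + (dT turn).1 = (m : Int) :=
      ⟨(r + (dT turn).1).toNat, by omega⟩
    obtain ⟨cN, hcN⟩ : ∃ m : Nat, c + (dT turn).2 = (m : Int) :=
      ⟨(c + (dT turn).2).toNat, by omega⟩
    have hsub : (r + (dT turn).1) - (c + (dT turn).2) = ((rN : Int) - (cN : Int)) := by
      rw [← hrN, ← hcN]
    have hS1 : SqShape n (pvSet2 S ((r + (dT turn).1) - (c + (dT turn).2)) (c + (dT turn).2) (k + 1)) :=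
      sqshape_set n S hS _ _ _ (by omega) (by omega)
    have hvalid1 : ∀ j : Nat, j < u + 1 →
        0 ≤ (c + (dT turn).2) + (j + 1) * (dT turn).2 ∧
        (c + (dT turn).2) + (j + 1) * (dT turn).2 ≤ (r + (dT turn).1) + (j + 1) * (dT turn).1 ∧
        (r + (dT turn).1) + (j + 1) * (dT turn).1 < n := by
      intro j hj
      have := hvalid (j + 1) (by omega)
      push_cast at this ⊢
      constructor
      · have h := this.1; nlinarith [h]
      constructor
      · have h := this.2.1; nlinarith [h]
      · have h := this.2.2; nlinarith [h]
    obtain ⟨S', hloop, hS', hinner⟩ := ih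
      (pvSet2 S ((r + (dT turn).1) - (c + (dT turn).2)) (c + (dT turn).2) (k + 1))
      (r + (dT turn).1) (c + (dT turn).2) (k + 1) check hS1 hvalid1
    refine ⟨S', ?_, hS', ?_⟩
    · rw [loopA_succ]
      push_cast
      have hne : ¬ (((u : Int) + 1 + 1) - 1 = 0 ∧ check ≠ []) := by
        intro h
        have := h.1
        omega
      rw [if_neg hne]
      dsimp only
      rw [hA0, hA1]
      have e1 : (r + (dT turn).1) - (c + (dT turn).2) + ((dT turn).1 - (dT turn).2)
          = ((r + (dT turn).1) + (dT turn).1) - ((c + (dT turn).2) + (dT turn).2) := by ring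
      have e3 : ((u : Int) + 1 + 1) - 1 = ((u : Int) + 1) := by ring
      rw [e1, e3, hloop]
      have ea : (r + (dT turn).1) + ((u : Int) + 1) * (dT turn).1
          = r + ((u : Int) + 1 + 1) * (dT turn).1 := by ring
      have eb : (c + (dT turn).2) + ((u : Int) + 1) * (dT turn).2
          = c + ((u : Int) + 1 + 1) * (dT turn).2 := by ring
      rw [ea, eb]
    · rw [innerB_succ, hstepB]
      dsimp only
      rw [hrN, hcN, ← triOf_set n S hS rN cN (by omega) (by omega), ← hrN, ← hcN]
      rw [hinner]
      push_cast
      simp only [Prod.mk.injEq]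
      and_intros <;> first | rfl | trivial | ring | norm_num

def posInv (n i : Nat) (r c : Int) : Prop :=
  (i % 3 = 0 → r = 2 * ((i / 3 : Nat) : Int) - 1 ∧ c = ((i / 3 : Nat) : Int)) ∧
  (i % 3 = 1 → r = (n : Int) - 1 - ((i / 3 : Nat) : Int) ∧ c = ((i / 3 : Nat) : Int)) ∧
  (i % 3 = 2 → r = (n : Int) - 1 - ((i / 3 : Nat) : Int) ∧ c = (n : Int) - 1 - 2 * ((i / 3 : Nat) : Int))

lemma checkOf_succ (m : Nat) : checkOf (m + 1) = checkOf m ++ [(1 : Int) + m] := by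
  simp [checkOf, List.range_succ]

lemma pop_checkOf (m : Nat) :
    PySem.List.pop? (checkOf (m + 1)) (-1) = some ((1 : Int) + m, checkOf m) := by
  rw [checkOf_succ]
  exact PySem.List.pop?_last _ _

lemma nextTurn_mod (i : Nat) :
    nextTurn ((i % 3 : Nat) : Int) = (((i + 1) % 3 : Nat) : Int) := by
  have h : i % 3 = 0 ∨ i % 3 = 1 ∨ i % 3 = 2 := by omega
  rcases h with h | h | h <;>
    · rw [h, show (i + 1) % 3 = (i % 3 + 1) % 3 from by omega, h]
      norm_num [nextTurn]

lemma loopB_succ (f : Nat) (i n : Int) (st : List (List Int) × Int × Int × Int) :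
    loopB (f + 1) i n st = loopB f (i + 1) n (innerB (n - i).toNat i st) := rfl

lemma outer_corr (nN : Nat) :
    ∀ (m i : Nat), i + m = nN → ∀ (S : List (List Int)) (r c k : Int),
    SqShape nN S → posInv nN i r c →
    triOf nN (loopA (tn m) (k + 1)
        (S, (r + (dT ((i % 3 : Nat) : Int)).1) - (c + (dT ((i % 3 : Nat) : Int)).2),
          c + (dT ((i % 3 : Nat) : Int)).2, ((i % 3 : Nat) : Int), (m : Int), checkOf (m - 1))).1
      = (loopB m (i : Int) (nN : Int) (triOf nN S, r, c, k)).1 := by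
  intro m
  induction m with
  | zero =>
    intro i him S r c k hS hpos
    simp [tn, loopA, loopB]
  | succ m ih =>
    intro i him S r c k hS hpos
    have hmod : PySem.Int.mod (i : Int) 3 = ((i % 3 : Nat) : Int) := by
      exact_mod_cast PySem.Int.mod_natCast i 3
    have h3 : ((i % 3 : Nat) : Int) = 0 ∨ ((i % 3 : Nat) : Int) = 1 ∨ ((i % 3 : Nat) : Int) = 2 := by
      have : i % 3 = 0 ∨ i % 3 = 1 ∨ i % 3 = 2 := by omega
      rcases this with h | h | h <;> rw [h] <;> norm_num
    obtain ⟨hp0, hp1, hp2⟩ := hpos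
    have hq3 : i = 3 * (i / 3) + i % 3 := by omega
    have hvalid : ∀ j : Nat, j < m + 1 →
        0 ≤ c + (j + 1) * (dT ((i % 3 : Nat) : Int)).2 ∧
        c + (j + 1) * (dT ((i % 3 : Nat) : Int)).2 ≤ r + (j + 1) * (dT ((i % 3 : Nat) : Int)).1 ∧
        r + (j + 1) * (dT ((i % 3 : Nat) : Int)).1 < nN := by
      intro j hj
      have hs : i % 3 = 0 ∨ i % 3 = 1 ∨ i % 3 = 2 := by omega
      rcases hs with h | h | h
      · obtain ⟨hr, hc⟩ := hp0 h
        rw [h] at *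
        norm_num [dT]
        subst hr hc
        push_cast
        constructor
        · omega
        constructor
        · omega
        · omega
      · obtain ⟨hr, hc⟩ := hp1 h
        rw [h] at *
        norm_num [dT]
        subst hr hc
        push_cast
        constructor
        · omega
        constructor
        · omega
        · omega
      · obtain ⟨hr, hc⟩ := hp2 h
        rw [h] at *
        norm_num [dT]
        subst hr hc
        push_cast
        constructor
        · omega
        constructor
        · omega
        · omega
    obtain ⟨S', hloop, hS', hinner⟩ := run_corr nN (i : Int) ((i % 3 : Nat) : Int) hmod h3 m
      S r c k (checkOf ((m + 1) - 1)) hS hvalid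
    have hfuel : tn (m + 1) = (m + 1) + tn m := rfl
    have hcast1 : ((m + 1 : Nat) : Int) = (m : Int) + 1 := by push_cast; ring
    rw [hfuel, loopA_add, hcast1, hloop]
    have htoNat : ((nN : Int) - (i : Int)).toNat = m + 1 := by omega
    rw [loopB_succ, htoNat, hinner]
    by_cases hm : m = 0
    · subst hm
      simp only [tn, loopA, loopB]
    · obtain ⟨m', rfl⟩ : ∃ m'', m = m'' + 1 := ⟨m - 1, by omega⟩
      simp only [Nat.add_sub_cancel]
      have hchkne : checkOf (m' + 1) ≠ [] := by
        rw [checkOf_succ]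
        simp
      have hpost : postRC (r + ((m' + 1 : Nat) + 1 : Int) * (dT ((i % 3 : Nat) : Int)).1)
          (c + ((m' + 1 : Nat) + 1 : Int) * (dT ((i % 3 : Nat) : Int)).2) ((i % 3 : Nat) : Int)
          (checkOf (m' + 1))
          = ((r + ((m' + 1 : Nat) + 1 : Int) * (dT ((i % 3 : Nat) : Int)).1
                + (dT (((i + 1) % 3 : Nat) : Int)).1)
              - ((c + ((m' + 1 : Nat) + 1 : Int) * (dT ((i % 3 : Nat) : Int)).2)
                + (dT (((i + 1) % 3 : Nat) : Int)).2),
              (c + ((m' + 1 : Nat) + 1 : Int) * (dT ((i % 3 : Nat) : Int)).2)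
                + (dT (((i + 1) % 3 : Nat) : Int)).2,
              (((i + 1) % 3 : Nat) : Int), ((m' + 1 : Nat) : Int), checkOf m') := by
        unfold postRC
        rw [if_neg hchkne, if_neg hchkne, if_neg hchkne, pop_checkOf m', nextTurn_mod i]
        simp only [Option.getD_some, Prod.mk.injEq]
        and_intros <;> first | rfl | (push_cast; try ring)
      rw [hpost]
      have ev : k + 1 + (((m' + 1 : Nat) : Int) + 1) = (k + (((m' + 1 : Nat) : Int) + 1)) + 1 := by
        ring
      rw [ev]
      have hposN : posInv nN (i + 1)
          (r + ((m' + 1 : Nat) + 1 : Int) * (dT ((i % 3 : Nat) : Int)).1)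
          (c + ((m' + 1 : Nat) + 1 : Int) * (dT ((i % 3 : Nat) : Int)).2) := by
        have hs : i % 3 = 0 ∨ i % 3 = 1 ∨ i % 3 = 2 := by omega
        rcases hs with h | h | h
        · obtain ⟨hr, hc⟩ := hp0 h
          have hd : dT ((i % 3 : Nat) : Int) = (1, 0) := by rw [h]; norm_num [dT]
          refine ⟨fun h' => absurd h' (by omega), fun h' => ?_, fun h' => absurd h' (by omega)⟩
          rw [hd]
          constructor <;> push_cast <;> push_cast at hr hc <;> omega
        · obtain ⟨hr, hc⟩ := hp1 h
          have hd : dT ((i % 3 : Nat) : Int) = (0, 1) := by rw [h]; norm_num [dT]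
          refine ⟨fun h' => absurd h' (by omega), fun h' => absurd h' (by omega), fun h' => ?_⟩
          rw [hd]
          constructor <;> push_cast <;> push_cast at hr hc <;> omega
        · obtain ⟨hr, hc⟩ := hp2 h
          have hd : dT ((i % 3 : Nat) : Int) = (-1, -1) := by rw [h]; norm_num [dT]
          refine ⟨fun h' => ?_, fun h' => absurd h' (by omega), fun h' => absurd h' (by omega)⟩
          rw [hd]
          constructor <;> push_cast <;> push_cast at hr hc <;> omega
      exact ih (i + 1) (by omega) S' _ _ _ hS' hposN

lemma flatMap_rows (L : List (List Int)) : L.flatMap (fun row => row) = L.flatten := by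
  simp

-- inside Pre_ the trip count is at most 2^53, so the float model is the identity
lemma pyFloatInt_small (w : Int) (h : w ≤ 9007199254740992) : pyFloatInt w = w := by
  unfold pyFloatInt
  rw [if_pos h]

-- ===== VERDICT (by name: the statement is the Claim_ definition above) =====
theorem solution_spec : Claim_equal_solution := by
  unfold Claim_equal_solution Spec_solution Pre_solution
  intro n _ hpre
  obtain ⟨h1, h2⟩ := hpre
  obtain ⟨nN, hn⟩ : ∃ m : Nat, n = (m : Int) := ⟨n.toNat, by omega⟩
  subst hn
  have hnN1 : 1 ≤ nN := by exact_mod_cast h1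
  obtain ⟨m0, hm0⟩ : ∃ m0, nN = m0 + 1 := ⟨nN - 1, by omega⟩
  have hrange : PySem.List.pyRange 1 ((nN : Int) + 1) 1 = checkOf nN := by
    rw [PySem.List.pyRange_one, show (((nN : Int) + 1) - 1).toNat = nN from by omega]
    rfl
  have hpop : PySem.List.pop? (PySem.List.pyRange 1 ((nN : Int) + 1) 1) (-1)
      = some ((nN : Int), checkOf (nN - 1)) := by
    rw [hrange, hm0, pop_checkOf]
    have e1 : (1 : Int) + m0 = ((m0 + 1 : Nat) : Int) := by push_cast; ring
    rw [e1]
    simp only [Nat.add_sub_cancel]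
  have hprod : ((nN : Int) + 1) * (nN : Int) = 2 * ((tn nN : Nat) : Int) := by
    calc ((nN : Int) + 1) * (nN : Int) = ((nN * (nN + 1) : Nat) : Int) := by push_cast; ring
    _ = ((2 * tn nN : Nat) : Int) := by rw [two_tn]
    _ = 2 * ((tn nN : Nat) : Int) := by push_cast; ring
  have htd : PySem.Int.truncdiv (((nN : Int) + 1) * (nN : Int)) 2 = ((tn nN : Nat) : Int) := by
    rw [hprod]
    unfold PySem.Int.truncdiv
    exact Int.mul_tdiv_cancel_left _ (by norm_num : (2 : Int) ≠ 0)
  have htnle : ((tn nN : Nat) : Int) ≤ 9007199254740992 := by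
    have := hprod
    omega
  have hfuel : (pyFloatInt (PySem.Int.truncdiv (((nN : Int) + 1) * (nN : Int)) 2)).toNat
      = tn nN := by
    rw [htd, pyFloatInt_small _ htnle]
    exact Int.toNat_natCast _
  have hshape : SqShape nN (List.replicate nN (List.replicate nN (0 : Int))) := by
    constructor
    · simp
    · intro j hj
      simp
  have hpos0 : posInv nN 0 (-1) 0 := by
    refine ⟨fun _ => ⟨by norm_num, by norm_num⟩, fun h => absurd h (by norm_num),
      fun h => absurd h (by norm_num)⟩
  have H := outer_corr nN nN 0 (by omega) (List.replicate nN (List.replicate nN 0))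
    (-1) 0 0 hshape hpos0
  norm_num [dT] at H
  have hT1 : ((nN : Int) + 1).toNat = nN + 1 := by omega
  show (match PySem.List.pop? (PySem.List.pyRange 1 ((nN : Int) + 1) 1) (-1) with
    | none => ([] : List Int)
    | some (turnTime, check) =>
      readAllA ((nN : Int) + 1).toNat 0
        (loopA (pyFloatInt (PySem.Int.truncdiv (((nN : Int) + 1) * (nN : Int)) 2)).toNat 1
          (List.replicate (nN : Int).toNat (List.replicate (nN : Int).toNat (0 : Int)),
            0, 0, 0, turnTime, check)).1 []) = solution_alt (nN : Int)
  rw [hpop]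
  show readAllA ((nN : Int) + 1).toNat 0
      (loopA (pyFloatInt (PySem.Int.truncdiv (((nN : Int) + 1) * (nN : Int)) 2)).toNat 1
        (List.replicate (nN : Int).toNat (List.replicate (nN : Int).toNat (0 : Int)),
          0, 0, 0, (nN : Int), checkOf (nN - 1))).1 [] = solution_alt (nN : Int)
  rw [hfuel, hT1, Int.toNat_natCast, readAll_eq_triOf, H]
  unfold solution_alt
  dsimp only
  rw [Int.toNat_natCast, ← triOf_init, flatMap_rows]
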